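-- pv_equiv track=rewrite | github.com/maxgrossman/work | bitwise/python_work/matching_bits.py | matching_bits_no_branch
-- ===== SOURCE A (Python) =====
-- def matching_bits_no_branch(a,b):
--     width = 8
--     matches = 0
--     while width:
--         matches += int(
--             (a >> width) == (b >> width)
--         )
--         width -= 1
--     return matches
-- ===== SOURCE B (Python) =====
-- def matching_bits_no_branch(a, b):
--     # closed form: (a>>w)==(b>>w) iff 0 <= a^b < 2**w; count w in 1..8 with w >= (a^b).bit_length()
--     d = a ^ b
--     if d < 0:
--         return 0
--     return min(8, max(0, 9 - d.bit_length()))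
-- ===== Notes on version B (the rewrite author's own statement) =====
-- stated objective: simpler
-- what changed: Replaced the 8-iteration shift-and-compare while loop by a loop-free closed form: d = a ^ b, return 0 if d < 0, else min(8, max(0, 9 - d.bit_length())), using (a>>w)==(b>>w) iff 0 <= a^b < 2**w.
import Mathlib
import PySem

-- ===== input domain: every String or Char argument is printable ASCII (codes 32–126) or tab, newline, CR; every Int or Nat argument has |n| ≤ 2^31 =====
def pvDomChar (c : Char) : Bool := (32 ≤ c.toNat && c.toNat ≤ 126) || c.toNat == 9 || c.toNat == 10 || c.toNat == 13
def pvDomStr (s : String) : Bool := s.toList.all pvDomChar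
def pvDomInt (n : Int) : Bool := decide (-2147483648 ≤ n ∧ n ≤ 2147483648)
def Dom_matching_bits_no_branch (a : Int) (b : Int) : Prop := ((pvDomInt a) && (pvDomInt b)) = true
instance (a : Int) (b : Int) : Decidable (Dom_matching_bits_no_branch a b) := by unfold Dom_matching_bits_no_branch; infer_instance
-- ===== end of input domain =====

-- B replaces A's 8-iteration shift-and-compare loop by a loop-free closed form on a ^ b (objective: simpler).

-- ===== PORT A =====
-- the `while width:` loop: state is (width, matches), one comparison per iteration
def matching_bits_no_branch_loop (a b : Int) (width : Nat) (acc : Int) : Int :=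
  if width = 0 then acc
  else matching_bits_no_branch_loop a b (width - 1)
        (acc + (if a >>> width = b >>> width then 1 else 0))

def matching_bits_no_branch (a : Int) (b : Int) : Int :=
  matching_bits_no_branch_loop a b 8 0

-- ===== PORT B =====
def matching_bits_no_branch_alt (a : Int) (b : Int) : Int :=
  let d := PySem.Int.bxor a b
  if d < 0 then 0
  else min 8 (max 0 (9 - (PySem.Int.bitLength d : Int)))

-- ===== PRECONDITION & SPEC =====
def Spec_matching_bits_no_branch (a : Int) (b : Int) (out : Int) : Prop := out = matching_bits_no_branch_alt a b
instance (a : Int) (b : Int) (out : Int) : Decidable (Spec_matching_bits_no_branch a b out) := by unfold Spec_matching_bits_no_branch; infer_instance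

-- ===== CLAIM (what is proved, stated in full; the proofs are below) =====
def Claim_equal_matching_bits_no_branch : Prop := ∀ (a : Int) (b : Int), Dom_matching_bits_no_branch a b → Spec_matching_bits_no_branch a b (matching_bits_no_branch a b)

-- ===== LEMMAS AND PROOFS =====

-- Nat core: the high bits (from w up) of m and n agree iff m ^^^ n < 2^w
theorem nat_shiftRight_eq_iff (m n w : Nat) : m >>> w = n >>> w ↔ m ^^^ n < 2 ^ w := by
  have hz : m ^^^ n < 2 ^ w ↔ (m ^^^ n) >>> w = 0 := by
    rw [Nat.shiftRight_eq_div_pow, Nat.div_eq_zero_iff]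
    constructor
    · intro h; right; exact h
    · rintro (h | h)
      · exact absurd h (Nat.pos_of_ne_zero (by positivity)).ne'
      · exact h
  rw [hz]
  constructor
  · intro h
    apply Nat.eq_of_testBit_eq
    intro i
    have := congrArg (fun x => x.testBit i) h
    simp only [Nat.testBit_shiftRight] at this ⊢
    simp [Nat.testBit_xor, this]
  · intro h
    apply Nat.eq_of_testBit_eq
    intro i
    have := congrArg (fun x => x.testBit i) h
    simp only [Nat.testBit_shiftRight, Nat.testBit_xor, Nat.zero_testBit] at this
    simp only [Nat.testBit_shiftRight]
    cases hm : (m.testBit (w + i)) <;> cases hn : (n.testBit (w + i)) <;>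
      simp [hm, hn] at this ⊢

-- Int version: (a >> w) == (b >> w) iff 0 ≤ a^b < 2^w
theorem int_shiftRight_eq_iff (a b : Int) (w : Nat) :
    a >>> w = b >>> w ↔ 0 ≤ PySem.Int.bxor a b ∧ PySem.Int.bxor a b < 2 ^ w := by
  cases a with
  | ofNat m =>
    cases b with
    | ofNat n =>
      show Int.ofNat (m >>> w) = Int.ofNat (n >>> w) ↔ _
      have hx : PySem.Int.bxor (Int.ofNat m) (Int.ofNat n) = ((m ^^^ n : Nat) : Int) := by
        simp [PySem.Int.bxor]
      rw [hx]
      constructor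
      · intro h
        refine ⟨Int.natCast_nonneg _, ?_⟩
        have : m >>> w = n >>> w := Int.ofNat.inj h
        have := (nat_shiftRight_eq_iff m n w).mp this
        exact_mod_cast this
      · rintro ⟨-, h⟩
        have h' : m ^^^ n < 2 ^ w := by exact_mod_cast h
        exact_mod_cast congrArg (Int.ofNat) ((nat_shiftRight_eq_iff m n w).mpr h')
    | negSucc n =>
      show Int.ofNat (m >>> w) = Int.negSucc (n >>> w) ↔ _
      have hx : PySem.Int.bxor (Int.ofNat m) (Int.negSucc n) < 0 := by
        simp only [PySem.Int.bxor]
        split_ifs with h1 h2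
        · omega
        · have : (Int.negSucc n) = -(n : Int) - 1 := by simp [Int.negSucc_eq]; ring
          omega
        · exact absurd (Int.natCast_nonneg m) h1
        · exact absurd (Int.natCast_nonneg m) h1
      constructor
      · intro h; exact absurd h (by intro hc; cases hc)
      · rintro ⟨h, -⟩; omega
  | negSucc m =>
    cases b with
    | ofNat n =>
      show Int.negSucc (m >>> w) = Int.ofNat (n >>> w) ↔ _
      have hx : PySem.Int.bxor (Int.negSucc m) (Int.ofNat n) < 0 := by
        simp only [PySem.Int.bxor]
        split_ifs with h1 h2 h3
        · exact absurd h1 (by rw [Int.negSucc_eq]; omega)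
        · exact absurd h1 (by rw [Int.negSucc_eq]; omega)
        · omega
        · exact absurd (Int.natCast_nonneg n) h3
      constructor
      · intro h; exact absurd h (by intro hc; cases hc)
      · rintro ⟨h, -⟩; omega
    | negSucc n =>
      show Int.negSucc (m >>> w) = Int.negSucc (n >>> w) ↔ _
      have hx : PySem.Int.bxor (Int.negSucc m) (Int.negSucc n) = ((m ^^^ n : Nat) : Int) := by
        have hm : ¬ (0 : Int) ≤ Int.negSucc m := by rw [Int.negSucc_eq]; omega
        have hn : ¬ (0 : Int) ≤ Int.negSucc n := by rw [Int.negSucc_eq]; omega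
        have em : -Int.negSucc m - 1 = (m : Int) := by rw [Int.negSucc_eq]; ring
        have en : -Int.negSucc n - 1 = (n : Int) := by rw [Int.negSucc_eq]; ring
        simp only [PySem.Int.bxor, if_neg hm, if_neg hn, em, en, Int.toNat_natCast]
      rw [hx]
      constructor
      · intro h
        refine ⟨Int.natCast_nonneg _, ?_⟩
        have : m >>> w = n >>> w := by
          have := Int.negSucc.injEq (m >>> w) (n >>> w) ▸ h
          exact Int.negSucc.inj h
        have := (nat_shiftRight_eq_iff m n w).mp this
        exact_mod_cast this
      · rintro ⟨-, h⟩
        have h' : m ^^^ n < 2 ^ w := by exact_mod_cast h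
        rw [(nat_shiftRight_eq_iff m n w).mpr h']

-- for 0 ≤ d : d < 2^w iff bit_length d ≤ w
theorem bitLength_le_iff (d : Int) (hd : 0 ≤ d) (w : Nat) :
    d < 2 ^ w ↔ PySem.Int.bitLength d ≤ w := by
  constructor
  · intro h
    by_cases h0 : d = 0
    · simp [h0, PySem.Int.bitLength_zero]
    · have h1 := PySem.Int.two_pow_bitLength_le d h0
      have hna : (d.natAbs : Int) = d := Int.natAbs_of_nonneg hd
      have h2 : (2 : Nat) ^ (PySem.Int.bitLength d - 1) < 2 ^ w := by
        have : (d.natAbs : Int) < 2 ^ w := by rw [hna]; exact h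
        have hlt : d.natAbs < 2 ^ w := by exact_mod_cast this
        omega
      have := (Nat.pow_lt_pow_iff_right (by norm_num : 1 < 2)).mp h2
      have hbl : PySem.Int.bitLength d ≠ 0 := by
        intro hc
        have := PySem.Int.lt_two_pow_bitLength d
        rw [hc] at this
        simp at this
        omega
      omega
  · intro h
    have h1 := PySem.Int.lt_two_pow_bitLength d
    have hna : (d.natAbs : Int) = d := Int.natAbs_of_nonneg hd
    have : d.natAbs < 2 ^ w :=
      lt_of_lt_of_le h1 (Nat.pow_le_pow_right (by norm_num) h)
    calc d = (d.natAbs : Int) := hna.symm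
      _ < ((2 ^ w : Nat) : Int) := by exact_mod_cast this
      _ = 2 ^ w := by push_cast; ring

-- the loop accumulates: loop a b w m = m + Σ_{i=1}^{w} [a >>> i = b >>> i]
theorem loop_eq_sum (a b : Int) (w : Nat) (m : Int) :
    matching_bits_no_branch_loop a b w m =
      m + ((List.range w).map (fun (i : Nat) => if a >>> (i + 1) = b >>> (i + 1) then (1 : Int) else 0)).sum := by
  induction w generalizing m with
  | zero => simp [matching_bits_no_branch_loop]
  | succ k ih =>
    rw [matching_bits_no_branch_loop]
    simp only [Nat.succ_ne_zero, if_false, Nat.add_sub_cancel]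
    rw [ih]
    rw [List.range_succ, List.map_append, List.sum_append]
    simp
    ring

-- ===== VERDICT (by name: the statement is the Claim_ definition above) =====
theorem matching_bits_no_branch_spec : Claim_equal_matching_bits_no_branch := by
  intro a b _
  show matching_bits_no_branch a b = matching_bits_no_branch_alt a b
  rw [matching_bits_no_branch, loop_eq_sum]
  rw [matching_bits_no_branch_alt]
  set d := PySem.Int.bxor a b with hd
  have hterm : ∀ i : Nat, (if a >>> (i + 1) = b >>> (i + 1) then (1 : Int) else 0) =
      (if 0 ≤ d ∧ d < 2 ^ (i + 1) then (1 : Int) else 0) := by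
    intro i
    rw [if_congr (int_shiftRight_eq_iff a b (i + 1)) rfl rfl]
  by_cases hneg : d < 0
  · simp only [hneg, if_true]
    have : ∀ i : Nat, (if a >>> (i + 1) = b >>> (i + 1) then (1 : Int) else 0) = 0 := by
      intro i; rw [hterm i, if_neg]; rintro ⟨h0, -⟩; omega
    simp only [List.range_succ, List.map_append, List.sum_append, List.map, List.sum_cons,
      List.sum_nil, List.range_zero, this]
    norm_num
  · rw [not_lt] at hneg
    simp only [not_lt.mpr hneg, if_false]
    have hterm2 : ∀ i : Nat, (if a >>> (i + 1) = b >>> (i + 1) then (1 : Int) else 0) =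
        (if PySem.Int.bitLength d ≤ i + 1 then (1 : Int) else 0) := by
      intro i
      rw [hterm i, if_congr (by rw [and_iff_right hneg, bitLength_le_iff d hneg]) rfl rfl]
    simp only [List.range_succ, List.map_append, List.sum_append, List.map, List.sum_cons,
      List.sum_nil, List.range_zero, hterm2]
    set h := PySem.Int.bitLength d with hh
    split_ifs <;> omega
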